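-- pv_equiv track=rewrite | github.com/qiskit-community/qiskit-qec | src/qiskit_qec/decoders/temp_code_util.py | temp_gauge_products
-- ===== SOURCE A (Python) =====
-- from functools import partial
-- from typing import List
--
-- def temp_gauge_products(stabilizers: List[List[int]], gauges: List[List[int]]) -> List[List[int]]:
--     """Compute product of gauge operators for each stabilizer.
--
--     stabilizers = list of stabilizer operator supports
--     gauges = list of gauge operator supports
--
--     For each stabilizer operator, record the indices of the
--     gauge operators in 'gauges' whose product is that stabilizer operator.
--
--     Return the list of indices.
--     """
--     gauge_products = []
--     for _, stab in enumerate(stabilizers):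
--         # is_contained = lambda x, j: set(gauges[j]).intersection(set(x)) == set(gauges[j])
--         def is_contained(x, j):
--             return set(gauges[j]).intersection(set(x)) == set(gauges[j])
--
--         products = filter(partial(is_contained, stab), range(len(gauges)))
--         gauge_products.append(list(products))
--     return gauge_products
-- ===== SOURCE B (Python) =====
-- from typing import List
--
--
-- def temp_gauge_products(stabilizers: List[List[int]], gauges: List[List[int]]) -> List[List[int]]:
--     """Inverted-index version: map each element to the gauges containing it,
--     then per stabilizer count hits per gauge and keep gauges fully covered."""
--     n = len(gauges)
--     need = []   # distinct-element count of each gauge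
--     index = {}  # element -> ascending list of gauge indices whose support contains it
--     for j in range(n):
--         distinct = list(dict.fromkeys(gauges[j]))
--         need.append(len(distinct))
--         for e in distinct:
--             index.setdefault(e, []).append(j)
--     result = []
--     for stab in stabilizers:
--         hits = [0] * n
--         for e in dict.fromkeys(stab):
--             for j in index.get(e, []):
--                 hits[j] += 1
--         result.append([j for j in range(n) if hits[j] == need[j]])
--     return result
-- ===== Notes on version B (the rewrite author's own statement) =====
-- stated objective: faster
-- what changed: Replaces A's per-(stabilizer,gauge) set-intersection tests by a once-built inverted index (element -> gauge indices) with per-gauge distinct-element counts; each stabilizer is then processed by hit-counting over its distinct elements.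
import Mathlib
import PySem

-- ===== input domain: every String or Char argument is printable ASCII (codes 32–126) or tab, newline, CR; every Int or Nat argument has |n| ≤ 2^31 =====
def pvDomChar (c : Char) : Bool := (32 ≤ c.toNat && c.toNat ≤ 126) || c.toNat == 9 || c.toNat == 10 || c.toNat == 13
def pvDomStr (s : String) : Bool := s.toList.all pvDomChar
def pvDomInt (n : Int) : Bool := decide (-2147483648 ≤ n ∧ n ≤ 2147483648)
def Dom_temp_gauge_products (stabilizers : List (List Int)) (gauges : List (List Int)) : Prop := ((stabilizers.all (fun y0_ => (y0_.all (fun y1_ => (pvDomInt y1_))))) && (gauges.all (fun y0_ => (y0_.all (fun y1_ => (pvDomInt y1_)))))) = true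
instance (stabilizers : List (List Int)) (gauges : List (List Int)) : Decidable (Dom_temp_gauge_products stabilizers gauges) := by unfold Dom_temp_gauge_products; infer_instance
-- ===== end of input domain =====

-- B replaces A's per-stabilizer subset tests by a single inverted index (element -> gauge
-- indices) plus per-stabilizer hit counting; same return value, different algorithm.


-- ===== PORT A =====
-- for stab in stabilizers: append list(filter(lambda j: set(gauges[j]) & set(stab) == set(gauges[j]), range(len(gauges))))
-- gauges[j] with j drawn from range(len(gauges)) is always in range, so pyGetD is exact here.
def temp_gauge_products (stabilizers : List (List Int)) (gauges : List (List Int)) : List (List Int) :=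
  stabilizers.foldl
    (fun acc stab =>
      acc ++ [(PySem.List.pyRange 0 (gauges.length : Int) 1).filter (fun j =>
        let gj := PySem.Set.ofList (PySem.List.pyGetD gauges j [])
        PySem.Set.equal (PySem.Set.inter gj (PySem.Set.ofList stab)) gj)])
    []

-- ===== PORT B =====
-- Build pass: need[j] = len(dict.fromkeys(gauges[j])); index: element -> list of gauge indices.
-- gauges[j] / hits[j] / need[j] are accessed with j from range(len(gauges)) or from the index
-- (always in range), so pyGetD/pySetD are exact here.
def temp_gauge_products_alt (stabilizers : List (List Int)) (gauges : List (List Int)) : List (List Int) :=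
  let n : Int := (gauges.length : Int)
  let st := (PySem.List.pyRange 0 n 1).foldl
    (fun (s : List Int × PySem.Dict Int (List Int)) j =>
      let distinct := PySem.List.dedup (PySem.List.pyGetD gauges j [])
      ((s.1 ++ [(distinct.length : Int)]),
       distinct.foldl (fun d e => d.modify e [] (· ++ [j])) s.2))
    ([], PySem.Dict.empty)
  let need := st.1
  let index := st.2
  stabilizers.foldl
    (fun acc stab =>
      let hits := (PySem.List.dedup stab).foldl
        (fun h e => (index.getD e []).foldl
          (fun h2 j => PySem.List.pySetD h2 j (PySem.List.pyGetD h2 j 0 + 1)) h)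
        (List.replicate n.toNat (0 : Int))
      acc ++ [(PySem.List.pyRange 0 n 1).filter
        (fun j => PySem.List.pyGetD hits j 0 == PySem.List.pyGetD need j 0)])
    []

-- ===== PRECONDITION & SPEC =====
def Spec_temp_gauge_products (stabilizers : List (List Int)) (gauges : List (List Int)) (out : List (List Int)) : Prop := out = temp_gauge_products_alt stabilizers gauges
instance (stabilizers : List (List Int)) (gauges : List (List Int)) (out : List (List Int)) : Decidable (Spec_temp_gauge_products stabilizers gauges out) := by unfold Spec_temp_gauge_products; infer_instance

-- ===== CLAIM (what is proved, stated in full; the proofs are below) =====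
def Claim_equal_temp_gauge_products : Prop := ∀ (stabilizers : List (List Int)) (gauges : List (List Int)), Dom_temp_gauge_products stabilizers gauges → Spec_temp_gauge_products stabilizers gauges (temp_gauge_products stabilizers gauges)

-- ===== LEMMAS AND PROOFS =====

-- folding over a flatMap is the nested fold
theorem pvFoldlFlatMap {α β γ : Type} (f : γ → β → γ) (g : α → List β) :
    ∀ (l : List α) (init : γ),
      (l.flatMap g).foldl f init = l.foldl (fun a x => (g x).foldl f a) init := by
  intro l
  induction l with
  | nil => intro init; rfl
  | cons x xs ih => intro init; simp [List.flatMap_cons, List.foldl_append, ih]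

-- the element->index pairs fed to the inverted index, in build order
def pvPairs (gauges : List (List Int)) : List (Int × Int) :=
  (PySem.List.pyRange 0 (gauges.length : Int) 1).flatMap
    (fun j => (PySem.List.dedup (PySem.List.pyGetD gauges j [])).map (fun e => (e, j)))

theorem pvIndex_eq (gauges : List (List Int)) :
    ((PySem.List.pyRange 0 (gauges.length : Int) 1).foldl
      (fun (d : PySem.Dict Int (List Int)) j =>
        (PySem.List.dedup (PySem.List.pyGetD gauges j [])).foldl
          (fun d e => d.modify e [] (· ++ [j])) d)
      PySem.Dict.empty)
    = (pvPairs gauges).foldl (fun d p => d.modify p.1 [] (· ++ [p.2])) PySem.Dict.empty := by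
  rw [pvPairs, pvFoldlFlatMap]
  apply PySem.List.foldl_congr_mem
  intro d j _
  rw [List.foldl_map]

theorem pvIndex_getD (gauges : List (List Int)) (e : Int) :
    ((pvPairs gauges).foldl (fun d p => d.modify p.1 [] (· ++ [p.2])) PySem.Dict.empty).getD e []
      = ((pvPairs gauges).filter (fun p => p.1 == e)).map (·.2) := by
  simpa using PySem.Dict.getD_foldl_modify_append (pvPairs gauges) PySem.Dict.empty e

-- one gauge block contributes its index to the entry of e exactly when it contains e
theorem pvEntryAux (e : Int) (f : Int → List Int) :
    ∀ (R : List Int),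
      ((R.flatMap (fun j => (PySem.List.dedup (f j)).map (fun x => (x, j)))).filter
          (fun p => p.1 == e)).map (·.2)
        = R.filter (fun j => decide (e ∈ f j)) := by
  intro R
  induction R with
  | nil => rfl
  | cons j R ih =>
    rw [List.flatMap_cons, List.filter_append, List.map_append, ih]
    have hblock : (((PySem.List.dedup (f j)).map (fun x => (x, j))).filter
        (fun p => p.1 == e)).map (·.2) = if e ∈ f j then [j] else [] := by
      rw [List.filter_map, List.map_map]
      have hpred : ((fun (p : Int × Int) => p.1 == e) ∘ (fun x => (x, j)))
          = (fun x => decide (x = e)) := by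
        funext x
        exact Bool.eq_iff_iff.mpr (by simp)
      rw [hpred, List.filter_eq]
      by_cases he : e ∈ f j
      · have : (PySem.List.dedup (f j)).count e = 1 :=
          List.count_eq_one_of_mem (PySem.List.nodup_dedup _)
            ((PySem.List.mem_dedup _ _).mpr he)
        simp only [PySem.List.dedup_eq_ofList] at this
        simp [this, he]
      · have : (PySem.List.dedup (f j)).count e = 0 :=
          List.count_eq_zero_of_not_mem (fun hm => he ((PySem.List.mem_dedup _ _).mp hm))
        simp only [PySem.List.dedup_eq_ofList] at this
        simp [this, he]
    rw [hblock, List.filter_cons]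
    by_cases he : e ∈ f j <;> simp [he]

-- the index entry of e is the ascending list of gauge indices containing e
theorem pvEntry (gauges : List (List Int)) (e : Int) :
    ((pvPairs gauges).filter (fun p => p.1 == e)).map (·.2)
      = (PySem.List.pyRange 0 (gauges.length : Int) 1).filter
          (fun j => decide (e ∈ PySem.List.pyGetD gauges j [])) := by
  rw [pvPairs]
  exact pvEntryAux e _ _

-- number of occurrences of gauge index j in the index entry of element e
theorem pvIndex_count (gauges : List (List Int)) (e j : Int) (h0 : 0 ≤ j)
    (hj : j < (gauges.length : Int)) :
    (((pvPairs gauges).filter (fun p => p.1 == e)).map (·.2)).count j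
      = (if e ∈ PySem.List.pyGetD gauges j [] then 1 else 0) := by
  rw [pvEntry]
  by_cases he : e ∈ PySem.List.pyGetD gauges j []
  · rw [if_pos he]
    apply List.count_eq_one_of_mem
    · exact (PySem.List.nodup_pyRange_one 0 _).filter _
    · exact List.mem_filter.mpr ⟨PySem.List.mem_pyRange_one.mpr ⟨h0, hj⟩, by simpa using he⟩
  · rw [if_neg he]
    apply List.count_eq_zero_of_not_mem
    intro hm
    exact he (by simpa using (List.mem_filter.mp hm).2)

-- every index stored in the inverted index is a valid gauge index
theorem pvIndex_mem_range (gauges : List (List Int)) (e : Int) (x : Int)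
    (hx : x ∈ ((pvPairs gauges).filter (fun p => p.1 == e)).map (·.2)) :
    0 ≤ x ∧ x < (gauges.length : Int) := by
  rw [pvEntry] at hx
  exact PySem.List.mem_pyRange_one.mp (List.mem_of_mem_filter hx)

-- the increment loop preserves the length of the hits array
theorem pvIncFoldLen :
    ∀ (L : List Int) (h : List Int),
      (L.foldl (fun h2 i => PySem.List.pySetD h2 i (PySem.List.pyGetD h2 i 0 + 1)) h).length
        = h.length := by
  intro L
  induction L with
  | nil => intro h; rfl
  | cons i L ih => intro h; rw [List.foldl_cons, ih, PySem.List.length_pySetD]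

-- the increment loop adds the count of j, provided all touched indices are in range
theorem pvIncFold :
    ∀ (L : List Int) (h : List Int),
      (∀ x ∈ L, 0 ≤ x ∧ x < (h.length : Int)) → ∀ (j : Int), 0 ≤ j → j < (h.length : Int) →
      PySem.List.pyGetD
          (L.foldl (fun h2 i => PySem.List.pySetD h2 i (PySem.List.pyGetD h2 i 0 + 1)) h) j 0
        = PySem.List.pyGetD h j 0 + (L.count j : Int) := by
  intro L
  induction L with
  | nil => intro h _ j _ _; simp
  | cons i L ih =>
    intro h hL j hj0 hjn
    obtain ⟨hi0, hin⟩ := hL i (List.mem_cons_self ..)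
    have hjt : j.toNat < h.length := by omega
    have hit : i.toNat < h.length := by omega
    set h' := PySem.List.pySetD h i (PySem.List.pyGetD h i 0 + 1) with hh'
    have hset : h' = h.set i.toNat (PySem.List.pyGetD h i 0 + 1) :=
      PySem.List.pySetD_of_nonneg h _ hi0
    have hlen' : h'.length = h.length := by rw [hset, List.length_set]
    have hL' : ∀ x ∈ L, 0 ≤ x ∧ x < (h'.length : Int) := by
      intro x hx; rw [hlen']; exact hL x (List.mem_cons_of_mem _ hx)
    have ihget := ih h' hL' j hj0 (by rw [hlen']; exact hjn)
    rw [List.foldl_cons, ← hh', ihget]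
    have hget' : PySem.List.pyGetD h' j 0
        = PySem.List.pyGetD h j 0 + (if i = j then 1 else 0) := by
      rw [hset, PySem.List.pyGetD_of_nonneg _ _ hj0, PySem.List.pyGetD_of_nonneg _ _ hj0]
      rw [List.getD_eq_getElem _ _ (by simpa using hjt), List.getD_eq_getElem _ _ hjt]
      rw [List.getElem_set]
      by_cases hij : i = j
      · subst hij
        rw [if_pos rfl, if_pos rfl, PySem.List.pyGetD_of_nonneg _ _ hi0,
          List.getD_eq_getElem _ _ hit]
      · have : i.toNat ≠ j.toNat := by omega
        rw [if_neg this, if_neg hij, add_zero]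
    rw [hget', List.count_cons]
    by_cases hij : i = j
    · simp [hij]; push_cast; ring
    · simp only [hij, if_false]
      have : (i == j) = false := by simp [hij]
      simp [this]

-- a 0/1 valued sum over Nat is a countP
theorem pvSumIte (p : Int → Bool) :
    ∀ (E : List Int), (E.map (fun e => if p e then (1 : Nat) else 0)).sum = E.countP p := by
  intro E
  induction E with
  | nil => rfl
  | cons x xs ih => by_cases hx : p x <;> simp [List.countP_cons, hx, ih] <;> omega

-- the hit count of gauge j after processing one stabilizer
theorem pvHitsFold (idx : Int → List Int) (n : Nat)
    (hidx : ∀ e x, x ∈ idx e → 0 ≤ x ∧ x < (n : Int)) :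
    ∀ (E : List Int) (h : List Int), h.length = n →
      ∀ (j : Int), 0 ≤ j → j < (n : Int) →
        PySem.List.pyGetD
          (E.foldl (fun h e => (idx e).foldl
            (fun h2 i => PySem.List.pySetD h2 i (PySem.List.pyGetD h2 i 0 + 1)) h) h) j 0
        = PySem.List.pyGetD h j 0 + ((E.map (fun e => (idx e).count j)).sum : Int) := by
  intro E
  induction E with
  | nil => intro h _ j _ _; simp
  | cons e E ih =>
    intro h hlen j hj0 hjn
    have hL : ∀ x ∈ idx e, 0 ≤ x ∧ x < (h.length : Int) := by
      intro x hx; rw [hlen]; exact hidx e x hx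
    set h' := (idx e).foldl
      (fun h2 i => PySem.List.pySetD h2 i (PySem.List.pyGetD h2 i 0 + 1)) h with hh'
    have hlen' : h'.length = n := by rw [hh', pvIncFoldLen, hlen]
    have hbase := pvIncFold (idx e) h hL j hj0 (by rw [hlen]; exact hjn)
    rw [List.foldl_cons, ← hh', ih h' hlen' j hj0 hjn, ← hh'] at *
    rw [hbase]
    simp only [List.map_cons, List.sum_cons]
    push_cast
    ring

-- cardinality: a nodup cover has full size exactly on supersets
theorem pvCard (stab g : List Int) :
    ((PySem.List.dedup stab).countP (fun e => decide (e ∈ g)) = (PySem.List.dedup g).length)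
      ↔ (∀ x ∈ g, x ∈ stab) := by
  rw [List.countP_eq_length_filter]
  set F := (PySem.List.dedup stab).filter (fun e => decide (e ∈ g)) with hF
  have hFnd : F.Nodup := (PySem.List.nodup_dedup stab).filter _
  have hFsub : F ⊆ PySem.List.dedup g := by
    intro x hx
    have := List.of_mem_filter hx
    exact (PySem.List.mem_dedup _ _).mpr (by simpa using this)
  have hsp : F.Subperm (PySem.List.dedup g) := List.subperm_of_subset hFnd hFsub
  constructor
  · intro hlen x hxg
    have hperm : F.Perm (PySem.List.dedup g) :=
      hsp.perm_of_length_le (le_of_eq hlen.symm)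
    have hxF : x ∈ F := hperm.mem_iff.mpr ((PySem.List.mem_dedup _ _).mpr hxg)
    have := List.mem_of_mem_filter hxF
    exact (PySem.List.mem_dedup _ _).mp this
  · intro hsub
    have hGsub : PySem.List.dedup g ⊆ F := by
      intro x hx
      have hxg : x ∈ g := (PySem.List.mem_dedup _ _).mp hx
      apply List.mem_filter.mpr
      exact ⟨(PySem.List.mem_dedup _ _).mpr (hsub x hxg), by simpa using hxg⟩
    have hsp' : (PySem.List.dedup g).Subperm F :=
      List.subperm_of_subset (PySem.List.nodup_dedup g) hGsub
    exact le_antisymm hsp.length_le hsp'.length_le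

-- ===== VERDICT (by name: the statement is the Claim_ definition above) =====
theorem temp_gauge_products_spec : Claim_equal_temp_gauge_products := by
  intro stabilizers gauges _
  show temp_gauge_products stabilizers gauges = temp_gauge_products_alt stabilizers gauges
  simp only [temp_gauge_products, temp_gauge_products_alt]
  rw [PySem.List.foldl_prod_mk
    (f := fun (s : List Int) (j : Int) =>
      s ++ [((PySem.List.dedup (PySem.List.pyGetD gauges j [])).length : Int)])
    (g := fun (d : PySem.Dict Int (List Int)) (j : Int) =>
      (PySem.List.dedup (PySem.List.pyGetD gauges j [])).foldl
        (fun d e => d.modify e [] (· ++ [j])) d)]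
  rw [pvIndex_eq, PySem.List.foldl_append_singleton_eq_map
    (f := fun (j : Int) => ((PySem.List.dedup (PySem.List.pyGetD gauges j [])).length : Int))]
  rw [PySem.List.foldl_append_singleton_eq_map (l := stabilizers) (acc := [])]
  rw [PySem.List.foldl_append_singleton_eq_map (l := stabilizers) (acc := [])]
  simp only [List.nil_append]
  apply List.map_congr_left
  intro stab _
  apply List.filter_congr
  intro j hjr
  obtain ⟨hj0, hjn⟩ := PySem.List.mem_pyRange_one.mp hjr
  have hneed : PySem.List.pyGetD
      (List.map (fun j => ((PySem.List.dedup (PySem.List.pyGetD gauges j [])).length : Int))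
        (PySem.List.pyRange 0 (gauges.length : Int) 1)) j 0
      = ((PySem.List.dedup (PySem.List.pyGetD gauges j [])).length : Int) :=
    PySem.List.pyGetD_map_pyRange_of_nonneg _ _ _ _ hj0 hjn
  have hidxb : ∀ (e x : Int),
      x ∈ (((pvPairs gauges).foldl (fun d p => d.modify p.1 [] (· ++ [p.2]))
        PySem.Dict.empty).getD e []) → 0 ≤ x ∧ x < (gauges.length : Int) := by
    intro e x hx
    rw [pvIndex_getD] at hx
    exact pvIndex_mem_range gauges e x hx
  have hrepl : (List.replicate ((gauges.length : Int)).toNat (0 : Int)).length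
      = gauges.length := by simp
  have hh := pvHitsFold
    (fun e => (((pvPairs gauges).foldl (fun d p => d.modify p.1 [] (· ++ [p.2]))
      PySem.Dict.empty).getD e [])) gauges.length hidxb (PySem.List.dedup stab)
    (List.replicate ((gauges.length : Int)).toNat (0 : Int)) hrepl j hj0 hjn
  have hz : PySem.List.pyGetD
      (List.replicate ((gauges.length : Int)).toNat (0 : Int)) j 0 = 0 := by
    have hb : j.toNat < (List.replicate ((gauges.length : Int)).toNat (0 : Int)).length := by
      simp; omega
    rw [PySem.List.pyGetD_of_nonneg _ _ hj0, List.getD_eq_getElem _ _ hb, List.getElem_replicate]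
  have hsum : ((PySem.List.dedup stab).map
      (fun e => ((((pvPairs gauges).foldl (fun d p => d.modify p.1 [] (· ++ [p.2]))
        PySem.Dict.empty).getD e [])).count j)).sum
      = (PySem.List.dedup stab).countP (fun e => decide (e ∈ PySem.List.pyGetD gauges j [])) := by
    have hc : ∀ e ∈ PySem.List.dedup stab,
        ((((pvPairs gauges).foldl (fun d p => d.modify p.1 [] (· ++ [p.2]))
          PySem.Dict.empty).getD e [])).count j
        = (if decide (e ∈ PySem.List.pyGetD gauges j []) then (1 : Nat) else 0) := by
      intro e _
      rw [pvIndex_getD, pvIndex_count gauges e j hj0 hjn]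
      by_cases he : e ∈ PySem.List.pyGetD gauges j [] <;> simp [he]
    rw [List.map_congr_left hc, pvSumIte]
  rw [hh, hz, hneed, hsum]
  rw [Bool.eq_iff_iff, PySem.Set.equal_iff, beq_iff_eq]
  have hiff : (∀ x, x ∈ (PySem.Set.ofList (PySem.List.pyGetD gauges j [])).inter
        (PySem.Set.ofList stab) ↔ x ∈ PySem.Set.ofList (PySem.List.pyGetD gauges j []))
      ↔ (∀ x ∈ PySem.List.pyGetD gauges j [], x ∈ stab) := by
    simp only [PySem.Set.mem_inter, PySem.Set.mem_ofList]
    constructor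
    · intro h x hx
      exact ((h x).mpr hx).2
    · intro h x
      exact ⟨fun hx => hx.1, fun hx => ⟨hx, h x hx⟩⟩
  refine Iff.trans hiff ?_
  rw [zero_add, Nat.cast_inj]
  exact (pvCard stab (PySem.List.pyGetD gauges j [])).symm
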